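-- pv_equiv track=rewrite | github.com/ismiljanic/SyntaxBase-moderation-microservice | src/utils.py | count_features
-- ===== SOURCE A (Python) =====
-- def count_features(text: str):
--     return {
--         "char_count": len(text),
--         "word_count": len(text.split()),
--         "num_uppercase": sum(1 for c in text if c.isupper()),
--         "num_exclamation": text.count("!"),
--         "num_question": text.count("?"),
--         "has_swear": int(any(bad in text.lower() for bad in ["fuck","shit","idiot","stupid","dumb"]))
--     }
-- ===== SOURCE B (Python) =====
-- def count_features(text: str):
--     chars = words = upper = excl = ques = 0
--     in_word = False
--     for c in text:
--         chars += 1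
--         if c.isspace():
--             in_word = False
--         else:
--             if not in_word:
--                 words += 1
--             in_word = True
--         if c.isupper():
--             upper += 1
--         if c == "!":
--             excl += 1
--         if c == "?":
--             ques += 1
--     low = text.lower()
--     has_swear = 0
--     for bad in ["fuck", "shit", "idiot", "stupid", "dumb"]:
--         if bad in low:
--             has_swear = 1
--             break
--     return {
--         "char_count": chars,
--         "word_count": words,
--         "num_uppercase": upper,
--         "num_exclamation": excl,
--         "num_question": ques,
--         "has_swear": has_swear,
--     }
-- ===== Notes on version B (the rewrite author's own statement) =====
-- stated objective: alternative
-- what changed: replaces A's four separate traversals (one generator sum, two .count scans, and a split() that materialises the word list) by one fused for-loop over the characters maintaining five counters plus an in-word flag, with the swear check as an early-exit loop; it trades C-level built-ins for a single explicit pass.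
import Mathlib
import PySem

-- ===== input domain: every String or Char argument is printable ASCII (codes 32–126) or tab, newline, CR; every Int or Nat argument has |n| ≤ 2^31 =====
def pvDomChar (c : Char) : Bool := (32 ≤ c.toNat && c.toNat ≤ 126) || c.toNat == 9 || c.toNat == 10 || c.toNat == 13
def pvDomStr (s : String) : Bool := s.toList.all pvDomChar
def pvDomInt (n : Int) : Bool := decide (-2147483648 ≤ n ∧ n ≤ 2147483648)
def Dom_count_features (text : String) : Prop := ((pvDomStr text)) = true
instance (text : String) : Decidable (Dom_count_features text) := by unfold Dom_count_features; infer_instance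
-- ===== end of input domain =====

-- B fuses A's separate scans (len, split(), generator sum, two .count) into one explicit loop over the
-- characters plus an early-exit swear loop; objective: alternative (one traversal instead of several).

-- ===== PORT A =====
def count_features (text : String) : List (String × Int) :=
  [("char_count", PySem.Str.len text),
   ("word_count", ((PySem.Str.split₀ text).length : Int)),
   ("num_uppercase", ((text.toList.filter (fun c => PySem.Chars.isupper c)).map (fun _ => (1 : Int))).sum),
   ("num_exclamation", (PySem.Str.count text "!" : Int)),
   ("num_question", (PySem.Str.count text "?" : Int)),
   ("has_swear", if (["fuck", "shit", "idiot", "stupid", "dumb"]).any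
        (fun bad => PySem.Str.isIn bad (PySem.Str.lower text)) then (1 : Int) else 0)]

-- ===== PORT B =====
-- the body of B's single fused for-loop: state (chars, words, upper, excl, ques, in_word)
def cfStep : Int × Int × Int × Int × Int × Bool → Char → Int × Int × Int × Int × Int × Bool
  | (chars, words, upper, excl, ques, inw), c =>
    (chars + 1,
     if PySem.Chars.isspace c then words else if inw then words else words + 1,
     if PySem.Chars.isupper c then upper + 1 else upper,
     if c = '!' then excl + 1 else excl,
     if c = '?' then ques + 1 else ques,
     if PySem.Chars.isspace c then false else true)

-- B's swear loop with early exit (the 'break')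
def cfSwear : List String → List Char → Int
  | [], _ => 0
  | bad :: rest, low => if PySem.Chars.isIn bad.toList low then 1 else cfSwear rest low

def count_features_alt (text : String) : List (String × Int) :=
  let st := text.toList.foldl cfStep (0, 0, 0, 0, 0, false)
  let (chars, words, upper, excl, ques, _) := st
  let low := (PySem.Str.lower text).toList
  [("char_count", chars),
   ("word_count", words),
   ("num_uppercase", upper),
   ("num_exclamation", excl),
   ("num_question", ques),
   ("has_swear", cfSwear ["fuck", "shit", "idiot", "stupid", "dumb"] low)]

-- ===== PRECONDITION & SPEC =====
def Spec_count_features (text : String) (out : List (String × Int)) : Prop := out = count_features_alt text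
instance (text : String) (out : List (String × Int)) : Decidable (Spec_count_features text out) := by unfold Spec_count_features; infer_instance

-- ===== CLAIM (what is proved, stated in full; the proofs are below) =====
def Claim_equal_count_features : Prop := ∀ (text : String), Dom_count_features text → Spec_count_features text (count_features text)

-- ===== LEMMAS AND PROOFS =====

-- the word counter B's loop maintains, as a standalone recursion over the remaining characters and the in-word flag
def wcount : List Char → Bool → Nat
  | [], _ => 0
  | c :: cs, inw =>
    if PySem.Chars.isspace c then wcount cs false
    else (if inw then 0 else 1) + wcount cs true

-- the final in-word flag of B's loop
def finw : List Char → Bool → Bool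
  | [], b => b
  | c :: cs, _ => finw cs (!PySem.Chars.isspace c)

-- invariant of B's fused loop: each component of the state accumulates its own count
lemma cfFold_eq (cs : List Char) (chars words upper excl ques : Int) (inw : Bool) :
    cs.foldl cfStep (chars, words, upper, excl, ques, inw) =
      (chars + cs.length, words + wcount cs inw, upper + (cs.countP (fun c => PySem.Chars.isupper c) : Int),
       excl + (cs.count '!' : Int), ques + (cs.count '?' : Int), finw cs inw) := by
  induction cs generalizing chars words upper excl ques inw with
  | nil => simp [wcount, finw]
  | cons c cs ih =>
    have e1 : PySem.Chars.isspace '!' = false := by decide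
    have e2 : PySem.Chars.isspace '?' = false := by decide
    have e3 : PySem.Chars.isupper '!' = false := by decide
    have e4 : PySem.Chars.isupper '?' = false := by decide
    simp only [List.foldl_cons, cfStep, wcount, finw, ih]
    by_cases hs : PySem.Chars.isspace c <;>
      by_cases hw : inw <;>
      by_cases hu : PySem.Chars.isupper c <;>
      by_cases he : c = '!' <;>
      by_cases hq : c = '?' <;>
      simp [hs, hw, hu, he, hq, List.countP_cons, List.count_cons, Prod.ext_iff, e1, e2, e3, e4] <;>
      omega

-- Python's s.count(sub) for a single-character sub is the per-character count B accumulates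
lemma count_go_single (c : Char) (cs : List Char) (fuel acc : Nat) (hf : cs.length ≤ fuel) :
    PySem.Chars.count.go [c] fuel cs acc = acc + cs.count c := by
  induction cs generalizing fuel acc with
  | nil => cases fuel <;> simp [PySem.Chars.count.go]
  | cons d cs ih =>
    cases fuel with
    | zero => simp at hf
    | succ n =>
      simp only [PySem.Chars.count.go]
      by_cases h : d = c
      · subst h
        simp [List.isPrefixOf, List.count_cons, ih _ _ (by simpa using hf)]
        omega
      · simp [List.isPrefixOf, Ne.symm h, h, ih _ _ (by simpa using hf)]

lemma chars_count_single (c : Char) (cs : List Char) :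
    PySem.Chars.count cs [c] = cs.count c := by
  simp [PySem.Chars.count, count_go_single c cs cs.length 0 le_rfl]

-- len(text.split()) is the number of maximal non-space runs, i.e. B's word counter
lemma split₀_go_length (cs : List Char) (cur : List Char) (acc : List (List Char)) :
    (PySem.Chars.split₀.go cs cur acc).length =
      acc.length + (if cur.isEmpty then 0 else 1) + wcount cs (!cur.isEmpty) := by
  induction cs generalizing cur acc with
  | nil =>
    by_cases h : cur.isEmpty <;> simp [PySem.Chars.split₀.go, h, wcount]
  | cons c cs ih =>
    by_cases hs : PySem.Chars.isspace c <;> by_cases h : cur.isEmpty <;>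
      simp [PySem.Chars.split₀.go, hs, h, ih, wcount] <;> omega

-- ===== VERDICT (by name: the statement is the Claim_ definition above) =====
theorem count_features_spec : Claim_equal_count_features := by
  intro text _
  unfold Spec_count_features count_features count_features_alt
  rw [cfFold_eq]
  have hword : ((PySem.Str.split₀ text).length : Int) = (wcount text.toList false : Int) := by
    simp [PySem.Str.split₀, PySem.Chars.split₀, split₀_go_length]
  simp only [PySem.Str.isIn, PySem.Str.toList_lower]
  simp [hword, PySem.Str.len_eq, PySem.Str.count, chars_count_single,
    List.countP_eq_length_filter, cfSwear]
  by_cases h1 : PySem.Chars.isIn "fuck".toList (PySem.Chars.lower text.toList) <;>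
  by_cases h2 : PySem.Chars.isIn "shit".toList (PySem.Chars.lower text.toList) <;>
  by_cases h3 : PySem.Chars.isIn "idiot".toList (PySem.Chars.lower text.toList) <;>
  by_cases h4 : PySem.Chars.isIn "stupid".toList (PySem.Chars.lower text.toList) <;>
  by_cases h5 : PySem.Chars.isIn "dumb".toList (PySem.Chars.lower text.toList) <;>
  simp_all
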